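-- pv_equiv track=rewrite | github.com/Andrea010725/Find_Physics_Zone | tools/visualize_physics_probe.py | get_stage_boundaries
-- ===== SOURCE A (Python) =====
-- def get_layer_stage(layer_name):
--     """Return stage name for a layer."""
--     if layer_name == "tokenizer_last":
--         return "tokenizer"
--     if layer_name.startswith("time_space_"):
--         return "spatiotemporal"
--     if layer_name == "next_state_hidden":
--         return "next_state"
--     if layer_name.startswith("ar_"):
--         return "autoregressive"
--     if layer_name.startswith("raw_pose_yaw"):
--         return "raw_baseline"
--     return "unknown"
--
-- def get_stage_boundaries(layers):
--     """Return indices where stage changes occur."""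
--     boundaries = []
--     prev_stage = None
--     for idx, layer in enumerate(layers):
--         stage = get_layer_stage(layer)
--         if stage != prev_stage and prev_stage is not None:
--             boundaries.append(idx)
--         prev_stage = stage
--     return boundaries
-- ===== SOURCE B (Python) =====
-- from itertools import groupby
--
-- def get_layer_stage(layer_name):
--     """Return stage name for a layer."""
--     if layer_name == "tokenizer_last":
--         return "tokenizer"
--     if layer_name.startswith("time_space_"):
--         return "spatiotemporal"
--     if layer_name == "next_state_hidden":
--         return "next_state"
--     if layer_name.startswith("ar_"):
--         return "autoregressive"
--     if layer_name.startswith("raw_pose_yaw"):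
--         return "raw_baseline"
--     return "unknown"
--
-- def get_stage_boundaries(layers):
--     """Return indices where stage changes occur."""
--     stages = [get_layer_stage(layer) for layer in layers]
--     boundaries = []
--     cum = 0
--     for _, group in groupby(stages):
--         cum += sum(1 for _ in group)
--         boundaries.append(cum)
--     return boundaries[:-1]
-- ===== Notes on version B (the rewrite author's own statement) =====
-- stated objective: idiomatic
-- what changed: B precomputes the stage sequence and walks its consecutive runs with itertools.groupby, appending the running cumulative run length after each group and dropping the final total, instead of A's inline prev-stage comparison per element.
import Mathlib
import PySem

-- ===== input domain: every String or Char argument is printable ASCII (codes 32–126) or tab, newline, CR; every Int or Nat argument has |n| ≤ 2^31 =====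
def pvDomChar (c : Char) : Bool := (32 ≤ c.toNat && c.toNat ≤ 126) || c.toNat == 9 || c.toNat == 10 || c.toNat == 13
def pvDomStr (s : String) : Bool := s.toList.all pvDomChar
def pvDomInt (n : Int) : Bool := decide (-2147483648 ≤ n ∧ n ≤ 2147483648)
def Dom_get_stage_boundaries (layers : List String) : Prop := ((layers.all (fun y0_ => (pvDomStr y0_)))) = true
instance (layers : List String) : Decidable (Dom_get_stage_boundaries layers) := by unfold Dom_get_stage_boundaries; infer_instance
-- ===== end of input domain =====

-- B replaces A's inline prev-stage comparison by precomputing the stage sequence and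
-- grouping it into consecutive runs (groupby), emitting cumulative run lengths (idiomatic).

-- shared helper: get_layer_stage, identical in both Pythons
def layerStage (layer_name : String) : String :=
  if layer_name == "tokenizer_last" then "tokenizer"
  else if PySem.Str.startswith layer_name "time_space_" then "spatiotemporal"
  else if layer_name == "next_state_hidden" then "next_state"
  else if PySem.Str.startswith layer_name "ar_" then "autoregressive"
  else if PySem.Str.startswith layer_name "raw_pose_yaw" then "raw_baseline"
  else "unknown"

-- ===== PORT A =====
-- the for-loop of A: state (idx, prev_stage, boundaries)
def loopA : List String → Int → Option String → List Int → List Int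
  | [], _, _, acc => acc
  | l :: ls, idx, prev, acc =>
    let stage := layerStage l
    let acc' := if (match prev with | none => false | some p => decide (stage ≠ p)) then acc ++ [idx] else acc
    loopA ls (idx + 1) (some stage) acc'

def get_stage_boundaries (layers : List String) : List Int := loopA layers 0 none []

-- ===== PORT B =====
-- the groupby loop of B: each consecutive run of equal stages adds its length to cum
def groupLoop : List String → Int → List Int
  | [], _ => []
  | x :: xs, cum =>
    let n : Int := 1 + (xs.takeWhile (fun y => y == x)).length
    (cum + n) :: groupLoop (xs.dropWhile (fun y => y == x)) (cum + n)
termination_by l _ => l.length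
decreasing_by
  simp only [List.length_cons]
  exact Nat.lt_succ_of_le (List.length_dropWhile_le _ _)

def get_stage_boundaries_alt (layers : List String) : List Int :=
  let stages := layers.map layerStage
  (groupLoop stages 0).dropLast   -- boundaries[:-1]

-- ===== PRECONDITION & SPEC =====
def Spec_get_stage_boundaries (layers : List String) (out : List Int) : Prop := out = get_stage_boundaries_alt layers
instance (layers : List String) (out : List Int) : Decidable (Spec_get_stage_boundaries layers out) := by unfold Spec_get_stage_boundaries; infer_instance

-- ===== CLAIM (what is proved, stated in full; the proofs are below) =====
def Claim_equal_get_stage_boundaries : Prop := ∀ (layers : List String), Dom_get_stage_boundaries layers → Spec_get_stage_boundaries layers (get_stage_boundaries layers)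

-- ===== LEMMAS AND PROOFS =====

-- proof-side view of A's loop: over the stage list, no accumulator
def loopS : List String → Int → Option String → List Int
  | [], _, _ => []
  | x :: xs, i, prev =>
    (if (match prev with | none => false | some p => decide (x ≠ p)) then [i] else []) ++ loopS xs (i + 1) (some x)

theorem loopA_eq_loopS (layers : List String) : ∀ (i : Int) (prev : Option String) (acc : List Int),
    loopA layers i prev acc = acc ++ loopS (layers.map layerStage) i prev := by
  induction layers with
  | nil => intro i prev acc; simp [loopA, loopS]
  | cons l ls ih =>
    intro i prev acc
    simp only [loopA, loopS, List.map_cons]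
    rw [ih]
    cases prev with
    | none => simp
    | some p =>
      by_cases h : layerStage l = p <;> simp [h]

theorem loopS_eq_groupLoop : ∀ (s : List String) (p : String) (i : Int),
    loopS s (i + 1) (some p) = (groupLoop (p :: s) i).dropLast := by
  intro s
  induction s with
  | nil => intro p i; rw [groupLoop]; simp [loopS, groupLoop]
  | cons x xs ih =>
    intro p i
    by_cases h : x = p
    · subst h
      have : groupLoop (x :: x :: xs) i = groupLoop (x :: xs) (i + 1) := by
        rw [groupLoop, groupLoop]
        simp only [List.takeWhile_cons, List.dropWhile_cons, beq_self_eq_true,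
          if_true, List.length_cons]
        congr 1
        · push_cast; ring
        · congr 1; push_cast; ring
      rw [this, ← ih]
      simp [loopS]
    · have hb : (x == p) = false := by simp [h]
      have hgx : ∃ m rest, groupLoop (x :: xs) (i + 1) = m :: rest := by
        rw [groupLoop]; exact ⟨_, _, rfl⟩
      obtain ⟨m, rest, hm⟩ := hgx
      have : groupLoop (p :: x :: xs) i = (i + 1) :: groupLoop (x :: xs) (i + 1) := by
        rw [groupLoop]
        simp [hb]
      rw [this, hm, List.dropLast_cons₂, ← hm, ← ih]
      simp [loopS, h]

-- ===== VERDICT (by name: the statement is the Claim_ definition above) =====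
theorem get_stage_boundaries_spec : Claim_equal_get_stage_boundaries := by
  intro layers _
  unfold Spec_get_stage_boundaries get_stage_boundaries get_stage_boundaries_alt
  rw [loopA_eq_loopS]
  cases layers with
  | nil => simp [groupLoop, loopS]
  | cons l ls =>
    simp only [List.map_cons, loopS, List.nil_append]
    have := loopS_eq_groupLoop (ls.map layerStage) (layerStage l) 0
    simpa using this
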